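-- pv_equiv track=rewrite | github.com/rainym00d/EmbedPrivacy | src/utils/data.py | add_eos_to_nested_lists
-- ===== SOURCE A (Python) =====
-- def add_eos_to_nested_lists(lst, max_length, eos_value):
--     if isinstance(lst, list) and len(lst) and isinstance(lst[0], list):
--         for i, elem in enumerate(lst):
--             lst[i] = add_eos_to_nested_lists(elem, max_length, eos_value)
--         return lst
--     elif isinstance(lst, list):
--         if len(lst) < max_length:
--             return lst + [eos_value]
--         return lst
--     else:
--         raise NotImplementedError(f"Unrecognized type {lst}")
-- ===== SOURCE B (Python) =====
-- def add_eos_to_nested_lists(lst, max_length, eos_value):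
--     # Non-recursive: one accumulator loop over the rows, building a fresh list
--     # (return value only; does not mutate lst in place like the original).
--     result = []
--     for row in lst:
--         result.append(row if len(row) >= max_length else row + [eos_value])
--     return result
-- ===== Notes on version B (the rewrite author's own statement) =====
-- stated objective: simpler
-- what changed: Replaces the recursive in-place rewriting of the nested structure with a single non-recursive accumulator loop that builds a fresh list of rows, appending eos to each short row.
-- outside the precondition, e.g. on add_eos_to_nested_lists([], 5, 7): A returns [7], B returns []
import Mathlib
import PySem

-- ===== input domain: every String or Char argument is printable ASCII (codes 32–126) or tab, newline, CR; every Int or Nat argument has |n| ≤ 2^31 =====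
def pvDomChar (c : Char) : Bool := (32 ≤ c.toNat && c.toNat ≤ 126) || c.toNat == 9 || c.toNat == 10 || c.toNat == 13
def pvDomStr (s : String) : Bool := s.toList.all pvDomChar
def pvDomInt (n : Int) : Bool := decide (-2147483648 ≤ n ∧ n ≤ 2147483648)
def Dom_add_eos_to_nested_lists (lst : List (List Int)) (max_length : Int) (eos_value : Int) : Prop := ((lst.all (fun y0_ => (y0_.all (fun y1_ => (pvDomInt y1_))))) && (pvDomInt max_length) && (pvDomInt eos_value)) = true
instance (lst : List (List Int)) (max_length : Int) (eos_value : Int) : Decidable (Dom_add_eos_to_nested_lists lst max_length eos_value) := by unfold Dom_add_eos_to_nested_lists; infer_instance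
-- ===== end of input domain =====

-- B replaces A's recursive in-place rewriting with one accumulator loop building a fresh
-- list (return value only: A mutates lst in place, B does not).
-- ===== PORT A =====
-- leaf branch of A's recursion: a row is a list of ints, so the recursive call on it
-- takes the `elif isinstance(lst, list)` branch
def pvLeafA (elem : List Int) (max_length : Int) (eos_value : Int) : List Int :=
  if (elem.length : Int) < max_length then elem ++ [eos_value] else elem

def add_eos_to_nested_lists (lst : List (List Int)) (max_length : Int) (eos_value : Int) : List (List Int) :=
  if lst.length ≠ 0 then
    -- `for i, elem in enumerate(lst): lst[i] = add_eos_to_nested_lists(elem, ...)`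
    lst.map (fun elem => pvLeafA elem max_length eos_value)
  else
    -- Python's leaf branch on the empty top-level list: when 0 < max_length it returns
    -- [] + [eos_value], an int element in a list[list[int]] slot — excluded by Pre_.
    lst

-- ===== PORT B =====
def add_eos_to_nested_lists_alt (lst : List (List Int)) (max_length : Int) (eos_value : Int) : List (List Int) :=
  lst.foldl
    (fun result row =>
      result ++ [if max_length ≤ (row.length : Int) then row else row ++ [eos_value]])
    []

-- ===== PRECONDITION & SPEC =====
-- Pre_ excludes only the empty top-level list with 0 < max_length, on which A returns
-- [eos_value]: an int where the declared return type list[list[int]] expects a list.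
def Pre_add_eos_to_nested_lists (lst : List (List Int)) (max_length : Int) (eos_value : Int) : Prop :=
  lst = [] → max_length ≤ 0
instance (lst : List (List Int)) (max_length : Int) (eos_value : Int) : Decidable (Pre_add_eos_to_nested_lists lst max_length eos_value) := by unfold Pre_add_eos_to_nested_lists; infer_instance
def pvWitness_add_eos_to_nested_lists : List (List Int) × Int × Int := ([[1], [2, 3]], 2, 9)

def Spec_add_eos_to_nested_lists (lst : List (List Int)) (max_length : Int) (eos_value : Int) (out : List (List Int)) : Prop := out = add_eos_to_nested_lists_alt lst max_length eos_value
instance (lst : List (List Int)) (max_length : Int) (eos_value : Int) (out : List (List Int)) : Decidable (Spec_add_eos_to_nested_lists lst max_length eos_value out) := by unfold Spec_add_eos_to_nested_lists; infer_instance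

-- ===== CLAIM (what is proved, stated in full; the proofs are below) =====
def Claim_equal_add_eos_to_nested_lists : Prop := ∀ (lst : List (List Int)) (max_length : Int) (eos_value : Int), Dom_add_eos_to_nested_lists lst max_length eos_value → Pre_add_eos_to_nested_lists lst max_length eos_value → Spec_add_eos_to_nested_lists lst max_length eos_value (add_eos_to_nested_lists lst max_length eos_value)

-- ===== LEMMAS AND PROOFS =====
theorem pv_foldl_append {α β : Type} (f : α → β) :
    ∀ (l : List α) (acc : List β),
      l.foldl (fun result row => result ++ [f row]) acc = acc ++ l.map f := by
  intro l
  induction l with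
  | nil => simp
  | cons x xs ih => intro acc; simp [List.foldl, ih]

theorem pv_alt_eq_map (lst : List (List Int)) (max_length eos_value : Int) :
    add_eos_to_nested_lists_alt lst max_length eos_value
      = lst.map (fun row => pvLeafA row max_length eos_value) := by
  unfold add_eos_to_nested_lists_alt
  rw [pv_foldl_append]
  simp only [List.nil_append]
  apply List.map_congr_left
  intro row _
  unfold pvLeafA
  split_ifs with h1 h2 h2 <;> first | rfl | omega

-- ===== VERDICT (by name: the statement is the Claim_ definition above) =====
theorem add_eos_to_nested_lists_spec : Claim_equal_add_eos_to_nested_lists := by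
  intro lst max_length eos_value _ hpre
  unfold Spec_add_eos_to_nested_lists add_eos_to_nested_lists
  rw [pv_alt_eq_map]
  split_ifs with h
  · rfl
  · have hnil : lst = [] := by
      cases lst with
      | nil => rfl
      | cons a l => simp at h
    simp [hnil]
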